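-- pv_equiv track=rewrite | github.com/jerrylususu/advent-of-code-2024 | pysrc/day22p2.py | get_price_changes
-- ===== SOURCE A (Python) =====
-- def mix_into_secret(secret, value):
--     return secret ^ value
--
-- def prune_secret(secret):
--     return secret % 16777216
--
-- def evolve_secret(secret):
--     temp1 = secret * 64
--     secret = mix_into_secret(secret, temp1)
--     secret = prune_secret(secret)
--
--     temp2 = secret // 32
--     secret = mix_into_secret(secret, temp2)
--     secret = prune_secret(secret)
--
--     temp3 = secret * 2048
--     secret = mix_into_secret(secret, temp3)
--     secret = prune_secret(secret)
--
--     return secret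
--
-- def get_price_changes(initial_secret, change_count=2000):
--     price_changes = []
--     prices = []
--     last_secret = initial_secret
--     for i in range(change_count):
--         current_secret = evolve_secret(last_secret)
--         last_price = last_secret % 10
--         current_price = current_secret % 10
--         price_changes.append(current_price - last_price)
--         prices.append(current_price)
--         last_secret = current_secret
--     return price_changes, prices
-- ===== SOURCE B (Python) =====
-- BITS = 24
--
--
-- def _to_bits(n):
--     # low 24 bits of n, least-significant first (Python >> works for negative n too)
--     return [(n >> i) & 1 for i in range(BITS)]
--
--
-- def _from_bits(bits):
--     # Horner evaluation from the most-significant end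
--     value = 0
--     for b in reversed(bits):
--         value = value * 2 + b
--     return value
--
--
-- def _xor_bits(a, b):
--     return [(x + y) % 2 for x, y in zip(a, b)]
--
--
-- def _shl_bits(bits, k):
--     # multiply by 2**k, truncated to 24 bits
--     return ([0] * k + bits)[:BITS]
--
--
-- def _shr_bits(bits, k):
--     # floor-divide by 2**k
--     return bits[k:] + [0] * k
--
--
-- def _evolve_bits(bits):
--     # the secret evolution is linear over GF(2): three shift-xor rounds on the bit vector
--     bits = _xor_bits(bits, _shl_bits(bits, 6))
--     bits = _xor_bits(bits, _shr_bits(bits, 5))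
--     bits = _xor_bits(bits, _shl_bits(bits, 11))
--     return bits
--
--
-- # Because the evolution is GF(2)-linear, evolve(s) = evolve(low 12 bits) XOR
-- # evolve(high 12 bits); tabulate both halves once via the bit-vector evolve.
-- _LOW = [_from_bits(_evolve_bits(_to_bits(v))) for v in range(4096)]
-- _HIGH = [_from_bits(_evolve_bits(_to_bits(v << 12))) for v in range(4096)]
--
--
-- def get_price_changes(initial_secret, change_count=2000):
--     price_changes = []
--     prices = []
--     secret = initial_secret % 16777216
--     last_price = initial_secret % 10
--     for _ in range(change_count):
--         secret = _LOW[secret & 4095] ^ _HIGH[secret >> 12]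
--         price = secret % 10
--         price_changes.append(price - last_price)
--         prices.append(price)
--         last_price = price
--     return price_changes, prices
-- ===== Notes on version B (the rewrite author's own statement) =====
-- stated objective: faster
-- what changed: B exploits that the secret evolution is linear over GF(2): it builds the evolution once as shift/xor rounds on a 24-entry bit vector, tabulates the evolved value of each 12-bit half (two 4096-entry tables), and then evolves per step by two table lookups and one xor instead of A's three multiply/floordiv/xor/mod rounds per step.
import Mathlib
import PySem

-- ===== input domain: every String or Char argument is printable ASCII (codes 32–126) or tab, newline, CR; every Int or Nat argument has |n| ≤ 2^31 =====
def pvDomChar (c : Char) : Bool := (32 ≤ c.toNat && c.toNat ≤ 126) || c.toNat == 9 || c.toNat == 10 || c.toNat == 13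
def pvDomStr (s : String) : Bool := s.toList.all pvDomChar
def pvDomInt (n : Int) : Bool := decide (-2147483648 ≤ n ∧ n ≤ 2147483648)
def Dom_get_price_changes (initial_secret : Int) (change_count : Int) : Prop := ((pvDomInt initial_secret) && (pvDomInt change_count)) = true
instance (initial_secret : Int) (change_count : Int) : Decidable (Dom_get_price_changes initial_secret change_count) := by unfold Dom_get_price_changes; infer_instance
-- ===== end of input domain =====

-- B exploits that the secret evolution is linear over GF(2): it tabulates the evolution of
-- each 12-bit half once (tables built from a 24-entry bit-vector form of the shift/xor
-- rounds) and then evolves by two table lookups and one xor per step.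

-- ===== PORT A =====
def mix_into_secret (secret value : Int) : Int := PySem.Int.bxor secret value

def prune_secret (secret : Int) : Int := PySem.Int.mod secret 16777216

def evolve_secret (secret : Int) : Int :=
  let temp1 := secret * 64
  let s1 := prune_secret (mix_into_secret secret temp1)
  let temp2 := PySem.Int.floordiv s1 32
  let s2 := prune_secret (mix_into_secret s1 temp2)
  let temp3 := s2 * 2048
  prune_secret (mix_into_secret s2 temp3)

def get_price_changes (initial_secret : Int) (change_count : Int) : List Int × List Int :=
  let st := (PySem.List.pyRange 0 change_count 1).foldl
    (fun (st : List Int × List Int × Int) _ =>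
      let current_secret := evolve_secret st.2.2
      let last_price := PySem.Int.mod st.2.2 10
      let current_price := PySem.Int.mod current_secret 10
      (st.1 ++ [current_price - last_price], st.2.1 ++ [current_price], current_secret))
    ([], [], initial_secret)
  (st.1, st.2.1)

-- ===== PORT B =====
-- low 24 bits of n, least-significant first ((n >> i) & 1, exact also for negative n)
def to_bits (n : Int) : List Int :=
  (PySem.List.pyRange 0 24 1).map (fun i => PySem.Int.band (n >>> i.toNat) 1)

-- Horner evaluation from the most-significant end
def from_bits (bits : List Int) : Int :=
  bits.reverse.foldl (fun value b => value * 2 + b) 0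

def xor_bits (a b : List Int) : List Int :=
  (a.zip b).map (fun p => PySem.Int.mod (p.1 + p.2) 2)

def shl_bits (bits : List Int) (k : Nat) : List Int :=
  PySem.List.slice (List.replicate k 0 ++ bits) none (some 24)

def shr_bits (bits : List Int) (k : Nat) : List Int :=
  PySem.List.slice bits (some (k : Int)) none ++ List.replicate k 0

def evolve_bits (bits : List Int) : List Int :=
  let b1 := xor_bits bits (shl_bits bits 6)
  let b2 := xor_bits b1 (shr_bits b1 5)
  xor_bits b2 (shl_bits b2 11)

-- the evolution is GF(2)-linear, so evolve(s) = evolve(low 12 bits) xor evolve(high 12 bits)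
def low_table : List Int :=
  (PySem.List.pyRange 0 4096 1).map (fun v => from_bits (evolve_bits (to_bits v)))

def high_table : List Int :=
  (PySem.List.pyRange 0 4096 1).map (fun (v : Int) => from_bits (evolve_bits (to_bits (v <<< (12 : Nat)))))

-- table indices are always in [0, 4096), so pyGetD's default is never used
def get_price_changes_alt (initial_secret : Int) (change_count : Int) : List Int × List Int :=
  let st := (PySem.List.pyRange 0 change_count 1).foldl
    (fun (st : List Int × List Int × Int × Int) _ =>
      let secret := PySem.Int.bxor
        (PySem.List.pyGetD low_table (PySem.Int.band st.2.2.1 4095) 0)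
        (PySem.List.pyGetD high_table (st.2.2.1 >>> (12 : Nat)) 0)
      let price := PySem.Int.mod secret 10
      (st.1 ++ [price - st.2.2.2], st.2.1 ++ [price], secret, price))
    ([], [], PySem.Int.mod initial_secret 16777216, PySem.Int.mod initial_secret 10)
  (st.1, st.2.1)

-- ===== PRECONDITION & SPEC =====
def Spec_get_price_changes (initial_secret : Int) (change_count : Int) (out : List Int × List Int) : Prop := out = get_price_changes_alt initial_secret change_count
instance (initial_secret : Int) (change_count : Int) (out : List Int × List Int) : Decidable (Spec_get_price_changes initial_secret change_count out) := by unfold Spec_get_price_changes; infer_instance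

-- ===== CLAIM (what is proved, stated in full; the proofs are below) =====
def Claim_equal_get_price_changes : Prop := ∀ (initial_secret : Int) (change_count : Int), Dom_get_price_changes initial_secret change_count → Spec_get_price_changes initial_secret change_count (get_price_changes initial_secret change_count)

-- ===== LEMMAS AND PROOFS =====

-- the Nat form of one evolution step, as three rounds
def pvR1 (n : Nat) : Nat := (n ^^^ n * 64) % 16777216
def pvR2 (n : Nat) : Nat := (n ^^^ n / 32) % 16777216
def pvR3 (n : Nat) : Nat := (n ^^^ n * 2048) % 16777216
def pvAnat (n : Nat) : Nat := pvR3 (pvR2 (pvR1 n))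

-- the canonical 24-entry bit list of a Nat
def pvBl (n : Nat) : List Int := (List.range 24).map (fun i => ((n.testBit i).toNat : Int))

lemma ibit (a : Int) (i : Nat) : a / ((2^i : Nat) : Int) % 2 = ((a.testBit i).toNat : Int) := by
  cases a with
  | ofNat m =>
    show ((m : Int)) / _ % 2 = ((m.testBit i).toNat : Int)
    rw [← Int.natCast_div]
    rw [show ((m / 2^i : Nat) : Int) % 2 = ((m / 2^i % 2 : Nat) : Int) from by push_cast; rfl]
    rw [Nat.testBit_eq_decide_div_mod_eq]
    rcases Nat.mod_two_eq_zero_or_one (m / 2^i) with h | h <;> simp [h]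
  | negSucc m =>
    rw [← Int.shiftRight_eq_div_pow, Int.negSucc_shiftRight, Nat.shiftRight_eq_div_pow]
    show (Int.negSucc (m / 2^i)) % 2 = ((!(m.testBit i)).toNat : Int)
    rw [Int.negSucc_eq, Nat.testBit_eq_decide_div_mod_eq]
    generalize m / 2^i = k
    rcases Nat.mod_two_eq_zero_or_one k with h | h <;> simp [h] <;> omega

lemma tb_char (a : Int) (i : Nat) : a.testBit i = decide (a / ((2^i : Nat) : Int) % 2 = 1) := by
  rw [ibit]; cases a.testBit i <;> simp

lemma bxor_eq_xor (a b : Int) : PySem.Int.bxor a b = Int.xor a b := by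
  rw [PySem.Int.bxor.eq_1]
  cases a with
  | ofNat m =>
    cases b with
    | ofNat n => simp [Int.xor]
    | negSucc n =>
      have h1 : ¬ (0:Int) ≤ Int.negSucc n := of_decide_eq_false rfl
      have h2 : (-(Int.negSucc n) - 1).toNat = n := by simp [Int.negSucc_eq]
      rw [if_pos (by exact Int.natCast_nonneg m), if_neg h1, h2]
      rw [show Int.xor (Int.ofNat m) (Int.negSucc n) = Int.negSucc (m ^^^ n) from rfl]
      rw [show ((Int.ofNat m).toNat : Nat) = m from rfl, Int.negSucc_eq]; ring
  | negSucc m =>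
    have h1 : ¬ (0:Int) ≤ Int.negSucc m := of_decide_eq_false rfl
    have h2 : (-(Int.negSucc m) - 1).toNat = m := by simp [Int.negSucc_eq]
    cases b with
    | ofNat n =>
      rw [if_neg h1, if_pos (by exact Int.natCast_nonneg n), h2]
      rw [show Int.xor (Int.negSucc m) (Int.ofNat n) = Int.negSucc (m ^^^ n) from rfl]
      rw [show ((Int.ofNat n).toNat : Nat) = n from rfl, Int.negSucc_eq]; ring
    | negSucc n =>
      have h3 : ¬ (0:Int) ≤ Int.negSucc n := of_decide_eq_false rfl
      have h4 : (-(Int.negSucc n) - 1).toNat = n := by simp [Int.negSucc_eq]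
      rw [if_neg h1, if_neg h3, h2, h4]
      rfl

-- the i-th bit (i < 24) of s % 2^24 is the i-th bit of s
lemma emod_div_two (s : Int) (i : Nat) (hi : i < 24) :
    (s % 16777216) / ((2^i : Nat) : Int) % 2 = s / ((2^i : Nat) : Int) % 2 := by
  push_cast
  have hp : ((2:Int)^(24-i)) * 2^i = 16777216 := by
    rw [← pow_add, Nat.sub_add_cancel (by omega)]; norm_num
  have hmod : s % 16777216 = s - 16777216 * (s / 16777216) := by omega
  have h2 : s - 16777216 * (s / 16777216) = s + (-(2^(24-i) * (s / 16777216))) * 2^i := by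
    rw [← hp]; ring
  rw [hmod, h2, Int.add_mul_ediv_right _ _ (by positivity)]
  have h3 : -(2^(24-i) * (s / 16777216)) = (-(2^(24-i-1) * (s / 16777216))) * 2 := by
    rw [show (2:Int)^(24-i) = 2^(24-i-1) * 2 by rw [← pow_succ]; congr 1; omega]; ring
  rw [h3, Int.add_mul_emod_self_right]

lemma emod_bit (s : Int) (i : Nat) (hi : i < 24) :
    ((s % 16777216).toNat).testBit i = s.testBit i := by
  have h0 : (0:Int) ≤ s % 16777216 := Int.emod_nonneg s (by norm_num)
  have hcast : ((s % 16777216).toNat : Int) = s % 16777216 := Int.toNat_of_nonneg h0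
  have hbridge : ((s % 16777216).toNat).testBit i = (((s % 16777216).toNat : Int)).testBit i := rfl
  rw [hbridge, tb_char, tb_char, hcast, emod_div_two s i hi]

-- bits of a * 2^k over Int
lemma mul_pow_bit (a : Int) (k i : Nat) :
    (a * ((2^k : Nat) : Int)).testBit i = (decide (k ≤ i) && a.testBit (i - k)) := by
  rcases Nat.lt_or_ge i k with h | h
  · have hk : (a * ((2^k : Nat) : Int)) / ((2^i : Nat) : Int) % 2 = 0 := by
      have hpow : ((2^k : Nat) : Int) = ((2:Int)^(k-i-1) * 2) * ((2^i : Nat) : Int) := by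
        push_cast
        rw [← pow_succ, ← pow_add]
        congr 1
        omega
      rw [hpow, show a * ((2:Int)^(k-i-1) * 2 * ((2^i : Nat) : Int)) = (a * 2^(k-i-1) * 2) * ((2^i : Nat) : Int) from by ring]
      rw [Int.mul_ediv_cancel _ (by positivity), Int.mul_emod_left]
    rw [tb_char, hk]
    simp [Nat.not_le_of_lt h]
  · have hk : (a * ((2^k : Nat) : Int)) / ((2^i : Nat) : Int) = a / ((2^(i-k) : Nat) : Int) := by
      push_cast
      rw [show (2:Int)^i = 2^k * 2^(i-k) by rw [← pow_add]; congr 1; omega]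
      rw [mul_comm a, Int.mul_ediv_mul_of_pos _ _ (by positivity)]
    rw [tb_char, hk, ← tb_char]
    simp [h]

lemma prune_eq_emod (s : Int) : prune_secret s = s % 16777216 :=
  PySem.Int.mod_eq_emod_of_pos (by norm_num)

-- the first pruned mix depends only on s % 2^24
lemma first_prune (s : Int) :
    prune_secret (mix_into_secret s (s * 64)) =
    prune_secret (mix_into_secret ((s % 16777216).toNat : Int) (((s % 16777216).toNat : Int) * 64)) := by
  set n0 : Nat := (s % 16777216).toNat with hn0
  have hL : (0:Int) ≤ PySem.Int.bxor s (s * 64) % 16777216 := Int.emod_nonneg _ (by norm_num)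
  simp only [mix_into_secret, prune_eq_emod]
  rw [show (PySem.Int.bxor s (s * 64)) % 16777216 = (((PySem.Int.bxor s (s * 64)) % 16777216).toNat : Int) from (Int.toNat_of_nonneg hL).symm]
  rw [show (PySem.Int.bxor ((n0:Nat) : Int) (((n0:Nat) : Int) * 64)) % 16777216 = (((PySem.Int.bxor (n0 : Int) ((n0 : Int) * 64)) % 16777216).toNat : Int) from (Int.toNat_of_nonneg (Int.emod_nonneg _ (by norm_num))).symm]
  congr 1
  apply Nat.eq_of_testBit_eq
  intro i
  rcases Nat.lt_or_ge i 24 with hi | hi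
  · rw [emod_bit _ i hi, emod_bit _ i hi]
    rw [bxor_eq_xor, bxor_eq_xor, Int.testBit_lxor, Int.testBit_lxor]
    rw [show (64:Int) = ((2^6 : Nat) : Int) from by norm_num]
    rw [mul_pow_bit, mul_pow_bit]
    have h1 : ((n0:Int)).testBit i = s.testBit i := by
      rw [show ((n0:Int)).testBit i = n0.testBit i from rfl, hn0, emod_bit s i hi]
    have h2 : ((n0:Int)).testBit (i - 6) = s.testBit (i - 6) := by
      rw [show ((n0:Int)).testBit (i-6) = n0.testBit (i-6) from rfl, hn0, emod_bit s (i-6) (by omega)]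
    rw [h1, h2]
  · have b1 : ((PySem.Int.bxor s (s * 64)) % 16777216).toNat < 2 ^ i := by
      have : ((PySem.Int.bxor s (s * 64)) % 16777216) < 16777216 := Int.emod_lt_of_pos _ (by norm_num)
      have h24 : (2:Nat)^24 ≤ 2^i := Nat.pow_le_pow_right (by norm_num) hi
      omega
    have b2 : ((PySem.Int.bxor (n0 : Int) ((n0 : Int) * 64)) % 16777216).toNat < 2 ^ i := by
      have : ((PySem.Int.bxor (n0 : Int) ((n0 : Int) * 64)) % 16777216) < 16777216 := Int.emod_lt_of_pos _ (by norm_num)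
      have h24 : (2:Nat)^24 ≤ 2^i := Nat.pow_le_pow_right (by norm_num) hi
      omega
    rw [Nat.testBit_lt_two_pow b1, Nat.testBit_lt_two_pow b2]

-- A's evolution on a Nat cast is pvAnat
lemma evolve_on_cast (n : Nat) : evolve_secret ((n : Nat) : Int) = ((pvAnat n : Nat) : Int) := by
  simp only [evolve_secret, mix_into_secret, prune_secret, pvAnat]
  rw [show ((n:Int) * 64) = (((n * 64 : Nat) : Nat) : Int) from by push_cast; ring]
  rw [PySem.Int.bxor_natCast]
  rw [show (16777216 : Int) = ((16777216 : Nat) : Int) from rfl, PySem.Int.mod_natCast]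
  rw [show (32 : Int) = ((32 : Nat) : Int) from rfl, PySem.Int.floordiv_natCast]
  rw [PySem.Int.bxor_natCast, PySem.Int.mod_natCast]
  rw [show (((((n ^^^ n * 64) % 16777216 ^^^ (n ^^^ n * 64) % 16777216 / 32) % 16777216 : Nat)) : Int) * 2048 = ((((n ^^^ n * 64) % 16777216 ^^^ (n ^^^ n * 64) % 16777216 / 32) % 16777216) * 2048 : Nat) from by push_cast; ring]
  rw [PySem.Int.bxor_natCast, PySem.Int.mod_natCast]
  rfl

-- A's evolution of any Int secret
lemma evolve_int (s : Int) : evolve_secret s = ((pvAnat ((s % 16777216).toNat) : Nat) : Int) := by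
  rw [← evolve_on_cast]
  simp only [evolve_secret]
  rw [first_prune s]

lemma pvAnat_lt (n : Nat) : pvAnat n < 16777216 := Nat.mod_lt _ (by norm_num)

-- ----- bit-list lemmas for B -----

lemma pvBl_congr {a b : Nat} (h : ∀ i, i < 24 → a.testBit i = b.testBit i) : pvBl a = pvBl b := by
  unfold pvBl
  exact List.map_congr_left (fun i hi => by rw [h i (List.mem_range.mp hi)])

lemma pvBl_mod (n : Nat) : pvBl (n % 16777216) = pvBl n := by
  apply pvBl_congr
  intro i hi
  rw [show (16777216 : Nat) = 2^24 from by norm_num, Nat.testBit_mod_two_pow]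
  simp [hi]

lemma xorb (a b : Nat) : xor_bits (pvBl a) (pvBl b) = pvBl (a ^^^ b) := by
  unfold xor_bits pvBl
  rw [List.zip_map', List.map_map]
  apply List.map_congr_left
  intro i _
  show PySem.Int.mod (((a.testBit i).toNat : Int) + ((b.testBit i).toNat : Int)) 2 = (((a ^^^ b).testBit i).toNat : Int)
  rw [Nat.testBit_xor]
  cases a.testBit i <;> cases b.testBit i <;> decide

lemma shlb (n : Nat) (k : Nat) : shl_bits (pvBl n) k = pvBl (n * 2^k) := by
  unfold shl_bits pvBl
  rw [PySem.List.slice_to _ (by norm_num)]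
  apply List.ext_getElem
  · simp
  · intro i h1 h2
    simp only [List.getElem_take, List.getElem_map, List.getElem_range]
    have hlen : i < 24 := by simpa using h1
    rw [Nat.testBit_mul_two_pow]
    rcases Nat.lt_or_ge i k with h | h
    · rw [List.getElem_append_left (by simpa using h)]
      simp [List.getElem_replicate, Nat.not_le_of_lt h]
    · rw [List.getElem_append_right (by simpa using h)]
      simp [h, List.length_replicate]

lemma shrb (n : Nat) (k : Nat) (hk : k ≤ 24) (hn : n < 16777216) :
    shr_bits (pvBl n) k = pvBl (n / 2^k) := by
  unfold shr_bits pvBl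
  rw [PySem.List.slice_from _ (by positivity), Int.toNat_natCast]
  apply List.ext_getElem
  · simp; omega
  · intro i h1 h2
    have hlen : i < 24 := by simpa using h2
    have hdlen : (List.drop k ((List.range 24).map (fun i => ((n.testBit i).toNat : Int)))).length = 24 - k := by simp
    simp only [List.getElem_map, List.getElem_range]
    rw [Nat.testBit_div_two_pow]
    rcases Nat.lt_or_ge i (24 - k) with h | h
    · rw [List.getElem_append_left (by omega)]
      simp only [List.getElem_drop, List.getElem_map, List.getElem_range]
      rw [Nat.add_comm k i]
    · rw [List.getElem_append_right (by omega)]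
      have hb : n.testBit (i + k) = false := by
        apply Nat.testBit_lt_two_pow
        calc n < 2^24 := by omega
        _ ≤ 2^(i+k) := Nat.pow_le_pow_right (by norm_num) (by omega)
      simp [hb, List.getElem_replicate]

lemma evolve_bits_eq (bits : List Int) : evolve_bits bits =
    xor_bits (xor_bits (xor_bits bits (shl_bits bits 6)) (shr_bits (xor_bits bits (shl_bits bits 6)) 5))
      (shl_bits (xor_bits (xor_bits bits (shl_bits bits 6)) (shr_bits (xor_bits bits (shl_bits bits 6)) 5)) 11) := rfl

lemma evolveb (n : Nat) : evolve_bits (pvBl n) = pvBl (pvAnat n) := by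
  rw [evolve_bits_eq]
  unfold pvAnat
  rw [shlb n 6, xorb]
  rw [show n * 2^6 = n * 64 from by norm_num]
  rw [← pvBl_mod (n ^^^ n * 64)]
  set a := (n ^^^ n * 64) % 16777216 with ha
  have haLT : a < 16777216 := Nat.mod_lt _ (by norm_num)
  rw [shrb a 5 (by norm_num) haLT, xorb]
  rw [show a / 2^5 = a / 32 from by norm_num]
  rw [← pvBl_mod (a ^^^ a / 32)]
  set b := (a ^^^ a / 32) % 16777216 with hb
  rw [shlb b 11, xorb]
  rw [show b * 2^11 = b * 2048 from by norm_num]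
  rw [← pvBl_mod (b ^^^ b * 2048)]
  unfold pvR3 pvR2 pvR1
  rw [← ha, ← hb]

lemma horner (f : Nat → Int) (k : Nat) (acc : Int) :
    (((List.range k).map f).reverse).foldl (fun v b => v*2+b) acc
      = acc * 2^k + (((List.range k).map (fun i => f i * 2^i)).sum) := by
  induction k generalizing acc with
  | zero => simp
  | succ k ih =>
    rw [List.range_succ, List.map_append, List.reverse_append]
    simp only [List.map_cons, List.map_nil, List.reverse_cons, List.reverse_nil,
      List.nil_append, List.singleton_append, List.foldl_cons]
    rw [ih, List.map_append, List.sum_append]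
    simp [pow_succ]
    ring

lemma bitsum (n k : Nat) :
    ((List.range k).map (fun i => ((n.testBit i).toNat : Int) * 2^i)).sum = ((n % 2^k : Nat) : Int) := by
  induction k with
  | zero => simp
  | succ k ih =>
    rw [List.range_succ, List.map_append, List.sum_append, ih]
    simp only [List.map_cons, List.map_nil, List.sum_cons, List.sum_nil]
    have hbit : ((n.testBit k).toNat : Int) = ((n / 2^k % 2 : Nat) : Int) := by
      rw [Nat.testBit_eq_decide_div_mod_eq]
      rcases Nat.mod_two_eq_zero_or_one (n / 2^k) with h | h <;> simp [h]
    rw [hbit]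
    have hm : n % 2^(k+1) = n % 2^k + 2^k * (n / 2^k % 2) := Nat.mod_pow_succ
    rw [hm]
    push_cast
    ring

lemma frombits (n : Nat) : from_bits (pvBl n) = ((n % 16777216 : Nat) : Int) := by
  unfold from_bits pvBl
  rw [horner, bitsum]
  norm_num

lemma tobits (s : Int) : to_bits s = pvBl ((PySem.Int.mod s 16777216).toNat) := by
  unfold to_bits pvBl
  rw [show (24 : Int) = ((24 : Nat) : Int) from rfl, PySem.List.pyRange_zero_natCast, List.map_map]
  apply List.map_congr_left
  intro i hi
  have hi24 : i < 24 := List.mem_range.mp hi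
  simp only [Function.comp_apply]
  rw [Int.toNat_natCast, PySem.Int.band_one, PySem.Int.mod_eq_emod_of_pos (by norm_num)]
  rw [Int.shiftRight_natCast_right, Int.shiftRight_eq_div_pow, ibit]
  rw [PySem.Int.mod_eq_emod_of_pos (by norm_num), emod_bit s i hi24]

-- ----- linearity of the evolution over xor, and the half tables -----

lemma xor_mul_pow (x y k : Nat) : (x ^^^ y) * 2^k = x * 2^k ^^^ y * 2^k := by
  apply Nat.eq_of_testBit_eq
  intro i
  simp [Nat.testBit_mul_two_pow, Nat.testBit_xor, Bool.and_xor_distrib_left]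

lemma xor_div_pow (x y k : Nat) : (x ^^^ y) / 2^k = x / 2^k ^^^ y / 2^k := by
  apply Nat.eq_of_testBit_eq
  intro i
  simp [Nat.testBit_div_two_pow, Nat.testBit_xor]

lemma xor_mod_pow (x y k : Nat) : (x ^^^ y) % 2^k = x % 2^k ^^^ y % 2^k := by
  apply Nat.eq_of_testBit_eq
  intro i
  simp [Nat.testBit_mod_two_pow, Nat.testBit_xor, Bool.and_xor_distrib_left]

lemma xor_shuffle (a b c d : Nat) : (a ^^^ b) ^^^ (c ^^^ d) = (a ^^^ c) ^^^ (b ^^^ d) := by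
  apply Nat.eq_of_testBit_eq
  intro i
  simp [Nat.testBit_xor]
  cases a.testBit i <;> cases b.testBit i <;> cases c.testBit i <;> cases d.testBit i <;> rfl

lemma pvR1_linear (x y : Nat) : pvR1 (x ^^^ y) = pvR1 x ^^^ pvR1 y := by
  unfold pvR1
  rw [show ((x ^^^ y) * 64) = (x ^^^ y) * 2^6 from by norm_num, xor_mul_pow,
      show (x * 2^6 = x * 64) from by norm_num, show (y * 2^6 = y * 64) from by norm_num,
      xor_shuffle x y (x * 64) (y * 64),
      show (16777216 : Nat) = 2^24 from by norm_num, xor_mod_pow]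

lemma pvR2_linear (x y : Nat) : pvR2 (x ^^^ y) = pvR2 x ^^^ pvR2 y := by
  unfold pvR2
  rw [show ((x ^^^ y) / 32) = (x ^^^ y) / 2^5 from by norm_num, xor_div_pow,
      show (x / 2^5 = x / 32) from by norm_num, show (y / 2^5 = y / 32) from by norm_num,
      xor_shuffle x y (x / 32) (y / 32),
      show (16777216 : Nat) = 2^24 from by norm_num, xor_mod_pow]

lemma pvR3_linear (x y : Nat) : pvR3 (x ^^^ y) = pvR3 x ^^^ pvR3 y := by
  unfold pvR3
  rw [show ((x ^^^ y) * 2048) = (x ^^^ y) * 2^11 from by norm_num, xor_mul_pow,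
      show (x * 2^11 = x * 2048) from by norm_num, show (y * 2^11 = y * 2048) from by norm_num,
      xor_shuffle x y (x * 2048) (y * 2048),
      show (16777216 : Nat) = 2^24 from by norm_num, xor_mod_pow]

lemma pvAnat_linear (x y : Nat) : pvAnat (x ^^^ y) = pvAnat x ^^^ pvAnat y := by
  unfold pvAnat
  rw [pvR1_linear, pvR2_linear, pvR3_linear]

lemma split_halves (m : Nat) : (m % 4096) ^^^ (m / 4096 * 4096) = m := by
  apply Nat.eq_of_testBit_eq
  intro i
  rw [Nat.testBit_xor,
      show (4096 : Nat) = 2^12 from by norm_num, Nat.testBit_mod_two_pow,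
      Nat.testBit_mul_two_pow, Nat.testBit_div_two_pow]
  rcases Nat.lt_or_ge i 12 with h | h
  · simp [h, Nat.not_le_of_lt h]
  · have : i - 12 + 12 = i := by omega
    simp [h, Nat.not_lt_of_ge h, this]

lemma table_entry (j : Nat) (hj : j < 16777216) :
    from_bits (evolve_bits (to_bits ((j : Nat) : Int))) = ((pvAnat j : Nat) : Int) := by
  rw [tobits]
  rw [show PySem.Int.mod ((j : Nat) : Int) 16777216 = (((j % 16777216 : Nat) : Nat) : Int) from by
        rw [show (16777216 : Int) = ((16777216 : Nat) : Int) from rfl, PySem.Int.mod_natCast]]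
  rw [Int.toNat_natCast, Nat.mod_eq_of_lt hj, evolveb j, frombits,
      Nat.mod_eq_of_lt (pvAnat_lt j)]

lemma low_at (j : Nat) (hj : j < 4096) :
    PySem.List.pyGetD low_table ((j : Nat) : Int) 0 = ((pvAnat j : Nat) : Int) := by
  unfold low_table
  rw [show (4096 : Int) = ((4096 : Nat) : Int) from rfl, PySem.List.pyRange_zero_natCast,
      List.map_map, PySem.List.pyGetD_natCast]
  rw [List.getD_eq_getElem _ _ (by simpa using hj)]
  simp only [List.getElem_map, List.getElem_range, Function.comp_apply]
  exact table_entry j (by omega)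

lemma high_at (j : Nat) (hj : j < 4096) :
    PySem.List.pyGetD high_table ((j : Nat) : Int) 0 = ((pvAnat (j * 4096) : Nat) : Int) := by
  unfold high_table
  rw [show (4096 : Int) = ((4096 : Nat) : Int) from rfl, PySem.List.pyRange_zero_natCast,
      List.map_map, PySem.List.pyGetD_natCast]
  rw [List.getD_eq_getElem _ _ (by simpa using hj)]
  simp only [List.getElem_map, List.getElem_range, Function.comp_apply]
  rw [show ((j : Nat) : Int) <<< (12 : Nat) = ((j <<< 12 : Nat) : Int) from Int.mem_toNat?.mp rfl]
  rw [show (j <<< 12 : Nat) = j * 4096 from by rw [Nat.shiftLeft_eq]]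
  exact table_entry (j * 4096) (by omega)

lemma table_step (n : Nat) (hn : n < 16777216) :
    PySem.Int.bxor
      (PySem.List.pyGetD low_table (PySem.Int.band ((n : Nat) : Int) 4095) 0)
      (PySem.List.pyGetD high_table (((n : Nat) : Int) >>> (12 : Nat)) 0) = ((pvAnat n : Nat) : Int) := by
  rw [show (4095 : Int) = ((4095 : Nat) : Int) from rfl, PySem.Int.band_natCast]
  rw [show (n &&& 4095) = n % 4096 from by
        apply Nat.eq_of_testBit_eq
        intro i
        rw [Nat.testBit_and, show (4095 : Nat) = 2^12 - 1 from by norm_num,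
            Nat.testBit_two_pow_sub_one, show (4096 : Nat) = 2^12 from by norm_num,
            Nat.testBit_mod_two_pow, Bool.and_comm]]
  rw [show ((n : Nat) : Int) >>> (12 : Nat) = ((n >>> 12 : Nat) : Int) from Int.mem_toNat?.mp rfl]
  rw [show (n >>> 12 : Nat) = n / 4096 from by rw [Nat.shiftRight_eq_div_pow]]
  rw [low_at (n % 4096) (Nat.mod_lt _ (by norm_num)), high_at (n / 4096) (by omega)]
  rw [PySem.Int.bxor_natCast, ← pvAnat_linear, split_halves]

-- ----- loop characterizations -----

-- A's price after k evolutions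
def pvP (init : Int) (k : Nat) : Int := PySem.Int.mod (evolve_secret^[k] init) 10

-- B's k-th produced price (k = 0 is the first iteration's price)
def pvPrB (n : Nat) (k : Nat) : Int := ((pvAnat^[k+1] n % 10 : Nat) : Int)

-- B's previous-price value before iteration k
def pvPrevB (n : Nat) (lp : Int) : Nat → Int
  | 0 => lp
  | k+1 => pvPrB n k

lemma map_range_succ_shift (g : Nat → Int) (n : Nat) :
    (List.range (n + 1)).map g = g 0 :: (List.range n).map (fun k => g (k + 1)) := by
  rw [List.range_succ_eq_map]
  simp [Function.comp, Nat.succ_eq_add_one]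

lemma foldA (l : List Int) (cs ps : List Int) (s : Int) :
    List.foldl
      (fun (st : List Int × List Int × Int) _ =>
        let current_secret := evolve_secret st.2.2
        let last_price := PySem.Int.mod st.2.2 10
        let current_price := PySem.Int.mod current_secret 10
        (st.1 ++ [current_price - last_price], st.2.1 ++ [current_price], current_secret))
      (cs, ps, s) l =
    (cs ++ (List.range l.length).map (fun k => pvP s (k + 1) - pvP s k),
     ps ++ (List.range l.length).map (fun k => pvP s (k + 1)),
     evolve_secret^[l.length] s) := by
  induction l generalizing cs ps s with
  | nil => simp
  | cons x t ih =>
    simp only [List.foldl_cons, List.length_cons, ih]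
    rw [map_range_succ_shift (fun k => pvP s (k + 1) - pvP s k) t.length,
        map_range_succ_shift (fun k => pvP s (k + 1)) t.length]
    have hP : ∀ k, pvP (evolve_secret s) k = pvP s (k + 1) := by
      intro k; simp [pvP, Function.iterate_succ_apply]
    have hI : evolve_secret^[t.length] (evolve_secret s) = evolve_secret^[t.length + 1] s := by
      simp [Function.iterate_succ_apply]
    simp only [hP, hI]
    simp [pvP, List.append_assoc]

lemma foldB (l : List Int) (cs ps : List Int) (n : Nat) (lp : Int) (hn : n < 16777216) :
    List.foldl
      (fun (st : List Int × List Int × Int × Int) _ =>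
        let secret := PySem.Int.bxor
          (PySem.List.pyGetD low_table (PySem.Int.band st.2.2.1 4095) 0)
          (PySem.List.pyGetD high_table (st.2.2.1 >>> (12 : Nat)) 0)
        let price := PySem.Int.mod secret 10
        (st.1 ++ [price - st.2.2.2], st.2.1 ++ [price], secret, price))
      (cs, ps, ((n : Nat) : Int), lp) l =
    (cs ++ (List.range l.length).map (fun k => pvPrB n k - pvPrevB n lp k),
     ps ++ (List.range l.length).map (pvPrB n),
     ((pvAnat^[l.length] n : Nat) : Int),
     pvPrevB n lp l.length) := by
  induction l generalizing cs ps n lp with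
  | nil => simp [pvPrevB]
  | cons x t ih =>
    simp only [List.foldl_cons, List.length_cons]
    have hev : PySem.Int.bxor
        (PySem.List.pyGetD low_table (PySem.Int.band ((n : Nat) : Int) 4095) 0)
        (PySem.List.pyGetD high_table (((n : Nat) : Int) >>> (12 : Nat)) 0) = ((pvAnat n : Nat) : Int) :=
      table_step n hn
    have hprice : PySem.Int.mod ((pvAnat n : Nat) : Int) 10 = pvPrB n 0 := by
      rw [show (10 : Int) = ((10 : Nat) : Int) from rfl, PySem.Int.mod_natCast]
      rfl
    simp only [hev, hprice]
    rw [ih _ _ (pvAnat n) (pvPrB n 0) (pvAnat_lt n)]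
    rw [map_range_succ_shift (fun k => pvPrB n k - pvPrevB n lp k) t.length,
        map_range_succ_shift (pvPrB n) t.length]
    have hPr : ∀ k, pvPrB (pvAnat n) k = pvPrB n (k + 1) := by
      intro k; simp [pvPrB, Function.iterate_succ_apply]
    have hPrev : ∀ k, pvPrevB (pvAnat n) (pvPrB n 0) k = pvPrevB n lp (k + 1) := by
      intro k; cases k with
      | zero => rfl
      | succ k => simp [pvPrevB, hPr]
    have hI : pvAnat^[t.length] (pvAnat n) = pvAnat^[t.length + 1] n := by
      simp [Function.iterate_succ_apply]
    simp only [hPr, hPrev, hI]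
    simp [pvPrevB, pvPrB, List.append_assoc]

-- A's k+1-st price equals B's k-th produced price
lemma price_bridge (s : Int) (k : Nat) :
    pvP s (k + 1) = pvPrB ((PySem.Int.mod s 16777216).toNat) k := by
  set n0 := (PySem.Int.mod s 16777216).toNat with hn0
  have hiter : ∀ k : Nat, evolve_secret^[k+1] s = ((pvAnat^[k+1] n0 : Nat) : Int) := by
    intro k
    induction k with
    | zero =>
      simp only [Nat.zero_add, Function.iterate_one]
      rw [evolve_int s, hn0, PySem.Int.mod_eq_emod_of_pos (by norm_num)]
    | succ k ih =>
      rw [Function.iterate_succ_apply', ih, evolve_on_cast,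
          show pvAnat^[k+1+1] n0 = pvAnat (pvAnat^[k+1] n0) from Function.iterate_succ_apply' pvAnat (k+1) n0]
  unfold pvP pvPrB
  rw [hiter k]
  rw [show (10 : Int) = ((10 : Nat) : Int) from rfl, PySem.Int.mod_natCast]

-- ===== VERDICT (by name: the statement is the Claim_ definition above) =====
theorem get_price_changes_spec : Claim_equal_get_price_changes := by
  intro init c _
  show _ = _
  unfold get_price_changes get_price_changes_alt
  set n0 := (PySem.Int.mod init 16777216).toNat with hn0
  have hmod : PySem.Int.mod init 16777216 = ((n0 : Nat) : Int) := by
    rw [hn0, PySem.Int.mod_eq_emod_of_pos (by norm_num),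
        Int.toNat_of_nonneg (Int.emod_nonneg init (by norm_num))]
  have hn0lt : n0 < 16777216 := by
    rw [hn0, PySem.Int.mod_eq_emod_of_pos (by norm_num)]
    have := Int.emod_lt_of_pos init (show (0:Int) < 16777216 by norm_num)
    omega
  rw [hmod, foldA, foldB _ _ _ _ _ hn0lt]
  have hdiff : ∀ k : Nat, pvP init (k + 1) - pvP init k = pvPrB n0 k - pvPrevB n0 (PySem.Int.mod init 10) k := by
    intro k
    cases k with
    | zero => rw [price_bridge]; rfl
    | succ k => rw [price_bridge, price_bridge]; rfl
  refine Prod.ext ?_ ?_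
  · simp only [List.nil_append]
    exact List.map_congr_left (fun k _ => hdiff k)
  · simp only [List.nil_append]
    exact List.map_congr_left (fun k _ => price_bridge init k)
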